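-- pv_equiv track=rewrite | github.com/tangoee139/MaPGen | medical_report_helper/report_parser_1115.py | find_longest_keyword
-- ===== SOURCE A (Python) =====
-- def find_longest_keyword(string, list_key):
--     # 将关键词列表按照长度降序排序，以便后面优先匹配较长的关键词
--     sorted_list_key = sorted(list_key, key=len, reverse=True)
--
--     # 遍历关键词列表，查找最长的关键词
--     longest_keyword = ""
--     for keyword in sorted_list_key:
--         if keyword in string:
--             # 如果关键词在字符串中出现，更新最长关键词
--             if len(keyword) > len(longest_keyword):
--                 longest_keyword = keyword
--
--     return longest_keyword
-- ===== SOURCE B (Python) =====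
-- def find_longest_keyword(string, list_key):
--     # Two staged passes, no sort and no best-string accumulator:
--     # pass 1 computes the length of the longest matching keyword (0 if none),
--     # pass 2 returns the first keyword of exactly that length that matches.
--     best_len = max((len(k) for k in list_key if k in string), default=0)
--     return next((k for k in list_key if len(k) == best_len and k in string), "")
-- ===== Notes on version B (the rewrite author's own statement) =====
-- stated objective: idiomatic
-- what changed: Replaces the sort-then-accumulate loop by two staged reductions: a max over the lengths of matching keywords, then a first-match search for a keyword of exactly that length, preserving A's earliest-of-longest tie-break.
import Mathlib
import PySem

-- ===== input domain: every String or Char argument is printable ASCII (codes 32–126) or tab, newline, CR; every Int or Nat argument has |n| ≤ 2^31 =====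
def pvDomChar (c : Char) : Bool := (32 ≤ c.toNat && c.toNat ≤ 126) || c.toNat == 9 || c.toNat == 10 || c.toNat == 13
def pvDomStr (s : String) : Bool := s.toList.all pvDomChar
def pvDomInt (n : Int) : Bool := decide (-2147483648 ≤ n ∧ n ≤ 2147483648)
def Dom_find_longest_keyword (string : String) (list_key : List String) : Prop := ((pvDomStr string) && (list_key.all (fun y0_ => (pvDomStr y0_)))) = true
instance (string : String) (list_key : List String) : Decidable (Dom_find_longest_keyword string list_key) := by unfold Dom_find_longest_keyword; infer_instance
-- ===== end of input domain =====

-- B replaces A's sort-then-accumulate loop by two staged passes (max matched length, then first keyword of that length that matches); same return value, no side effects.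


-- ===== PORT A =====
def find_longest_keyword (string : String) (list_key : List String) : String :=
  let sorted_list_key := PySem.List.sorted list_key (fun keyword => PySem.Str.len keyword) true
  sorted_list_key.foldl
    (fun longest_keyword keyword =>
      if PySem.Str.isIn keyword string then
        if PySem.Str.len longest_keyword < PySem.Str.len keyword then keyword else longest_keyword
      else longest_keyword) ""

-- ===== PORT B =====
def find_longest_keyword_alt (string : String) (list_key : List String) : String :=
  -- pass 1: max(len(k) for k in list_key if k in string) with default 0
  let best_len :=
    (PySem.List.max?
      ((list_key.filter (fun k => PySem.Str.isIn k string)).map (fun k => PySem.Str.len k))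
      (fun x => x)).getD 0
  -- pass 2: next(k for k in list_key if len(k) == best_len and k in string) with default ""
  (list_key.find? (fun k => PySem.Str.len k == best_len && PySem.Str.isIn k string)).getD ""

-- ===== PRECONDITION & SPEC =====
def Spec_find_longest_keyword (string : String) (list_key : List String) (out : String) : Prop := out = find_longest_keyword_alt string list_key
instance (string : String) (list_key : List String) (out : String) : Decidable (Spec_find_longest_keyword string list_key out) := by unfold Spec_find_longest_keyword; infer_instance

-- ===== CLAIM (what is proved, stated in full; the proofs are below) =====
def Claim_equal_find_longest_keyword : Prop := ∀ (string : String) (list_key : List String), Dom_find_longest_keyword string list_key → Spec_find_longest_keyword string list_key (find_longest_keyword string list_key)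

-- ===== LEMMAS AND PROOFS =====

-- A's loop step (with a Prop condition) and loop, as proof-side abbreviations.
def fkStep (string : String) (b k : String) : String :=
  if PySem.Str.isIn k string = true ∧ PySem.Str.len b < PySem.Str.len k then k else b

def fkRun (string : String) (acc : String) (xs : List String) : String :=
  xs.foldl (fkStep string) acc

-- proof-side recursion for B's first pass
def fkBest (string : String) : List String → Int
  | [] => 0
  | k :: t => if PySem.Str.isIn k string = true then max (PySem.Str.len k) (fkBest string t)
              else fkBest string t

lemma fk_len_nonneg (s : String) : 0 ≤ PySem.Str.len s := by
  simp [PySem.Str.len_eq]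

lemma fk_len_empty : PySem.Str.len "" = 0 := by decide

lemma fk_len_zero (s : String) (h : PySem.Str.len s = 0) : s = "" := by
  have hl : s.length = 0 := by simpa [PySem.Str.len_eq] using h
  exact String.length_eq_zero_iff.mp hl

lemma fkStep_true (string b k : String) (h : PySem.Str.isIn k string = true) :
    fkStep string b k = if PySem.Str.len b < PySem.Str.len k then k else b := by
  unfold fkStep
  by_cases h2 : PySem.Str.len b < PySem.Str.len k
  · rw [if_pos ⟨h, h2⟩, if_pos h2]
  · rw [if_neg (fun hc => h2 hc.2), if_neg h2]

lemma fkStep_false (string b k : String) (h : ¬ PySem.Str.isIn k string = true) :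
    fkStep string b k = b := if_neg (fun hc => h hc.1)

lemma fkStep_empty (string k : String) (h : PySem.Str.isIn k string = true) :
    fkStep string "" k = k := by
  rw [fkStep_true string "" k h, fk_len_empty]
  by_cases h2 : 0 < PySem.Str.len k
  · rw [if_pos h2]
  · rw [if_neg h2]
    have := fk_len_nonneg k
    exact (fk_len_zero k (by omega)).symm

-- A's step function is fkStep.
lemma fk_stepA_eq (string : String) :
    (fun longest_keyword keyword =>
      if PySem.Str.isIn keyword string then
        if PySem.Str.len longest_keyword < PySem.Str.len keyword then keyword else longest_keyword
      else longest_keyword) = fkStep string := by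
  funext b k
  simp only [fkStep]
  cases h : PySem.Str.isIn k string <;> simp

-- the loop result is the start value or an element of the list
lemma fk_run_mem (string : String) (xs : List String) :
    ∀ acc, fkRun string acc xs = acc ∨ fkRun string acc xs ∈ xs := by
  induction xs with
  | nil => intro acc; exact Or.inl rfl
  | cons k t ih =>
    intro acc
    have hstep : fkRun string acc (k :: t) = fkRun string (fkStep string acc k) t := rfl
    rcases ih (fkStep string acc k) with h | h
    · rw [hstep, h]
      unfold fkStep; split
      · exact Or.inr (by simp)
      · exact Or.inl rfl
    · rw [hstep]
      exact Or.inr (List.mem_cons_of_mem _ h)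

-- running from any accumulator is determined by the run from ""
lemma fk_run_acc (string : String) (xs : List String) :
    ∀ acc, fkRun string acc xs =
      if PySem.Str.len acc < PySem.Str.len (fkRun string "" xs)
      then fkRun string "" xs else acc := by
  induction xs with
  | nil =>
    intro acc
    have := fk_len_nonneg acc
    have h0 := fk_len_empty
    simp only [fkRun, List.foldl_nil]
    rw [if_neg (by omega)]
  | cons k t ih =>
    intro acc
    have hacc := fk_len_nonneg acc
    have hb0 := fk_len_nonneg (fkRun string "" t)
    have h0 := fk_len_empty
    have hL : fkRun string acc (k :: t) = fkRun string (fkStep string acc k) t := rfl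
    have hR : fkRun string "" (k :: t) = fkRun string (fkStep string "" k) t := rfl
    rw [hL, hR, ih (fkStep string acc k), ih (fkStep string "" k)]
    by_cases hP : PySem.Str.isIn k string = true
    · rw [fkStep_true string acc k hP, fkStep_true string "" k hP]
      split_ifs <;> first | rfl | omega
    · rw [fkStep_false string acc k hP, fkStep_false string "" k hP]
      split_ifs <;> first | rfl | omega

-- inserting x into a length-descending list: the loop sees it like a trailing element
lemma fk_run_insertBy (string : String) (x : String) (ys : List String)
    (hs : ys.Pairwise (fun a b => PySem.Str.len b ≤ PySem.Str.len a)) :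
    ∀ acc, fkRun string acc
        (PySem.List.insertBy (fun a b => decide (PySem.Str.len b < PySem.Str.len a)) x ys)
      = fkStep string (fkRun string acc ys) x := by
  induction ys with
  | nil => intro acc; rfl
  | cons y t ih =>
    intro acc
    rw [PySem.List.insertBy]
    by_cases hxy : PySem.Str.len y < PySem.Str.len x
    · rw [if_pos (by simpa using hxy)]
      have hb : PySem.Str.len (fkRun string "" (y :: t)) ≤ PySem.Str.len y := by
        rcases fk_run_mem string (y :: t) "" with h | h
        · rw [h, fk_len_empty]; exact fk_len_nonneg y
        · rcases List.mem_cons.mp h with h | h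
          · rw [h]
          · exact (List.pairwise_cons.mp hs).1 _ h
      have hacc := fk_len_nonneg acc
      have hb0 := fk_len_nonneg (fkRun string "" (y :: t))
      have hL : fkRun string acc (x :: y :: t) = fkRun string (fkStep string acc x) (y :: t) := rfl
      rw [hL, fk_run_acc string (y :: t) (fkStep string acc x), fk_run_acc string (y :: t) acc]
      by_cases hP : PySem.Str.isIn x string = true
      · rw [fkStep_true string acc x hP, fkStep_true string _ x hP]
        split_ifs <;> first | rfl | omega
      · rw [fkStep_false string acc x hP, fkStep_false string _ x hP]
    · rw [if_neg (by simpa using hxy)]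
      have hL : fkRun string acc
          (y :: PySem.List.insertBy (fun a b => decide (PySem.Str.len b < PySem.Str.len a)) x t)
          = fkRun string (fkStep string acc y)
              (PySem.List.insertBy (fun a b => decide (PySem.Str.len b < PySem.Str.len a)) x t) := rfl
      rw [hL, ih (List.Pairwise.of_cons hs) (fkStep string acc y)]
      rfl

-- the sorted pass computes the same result as the direct pass
lemma fk_sorted_run (string : String) (xs : List String) :
    fkRun string "" (PySem.List.sorted xs (fun k => PySem.Str.len k) true)
      = fkRun string "" xs := by
  induction xs using List.reverseRecOn with
  | nil => rfl
  | append_singleton xs x ih =>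
    rw [PySem.List.sorted_rev_eq_foldl_insertBy, List.foldl_append, List.foldl_cons,
        List.foldl_nil, ← PySem.List.sorted_rev_eq_foldl_insertBy,
        fk_run_insertBy string x _ (PySem.List.sorted_pairwise_rev xs _) "", ih]
    show fkStep string (List.foldl (fkStep string) "" xs) x = fkRun string "" (xs ++ [x])
    simp only [fkRun, List.foldl_append, List.foldl_cons, List.foldl_nil]

-- pulling an extra seed out of a running max
lemma fk_foldl_max_pull (r : List Int) :
    ∀ a x : Int, r.foldl max (max a x) = max a (r.foldl max x) := by
  induction r with
  | nil => intro a x; rfl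
  | cons y r ih =>
    intro a x
    simp only [List.foldl_cons]
    rw [max_assoc, ih]

-- the running max from a nonnegative seed, in terms of max? (Python's max with default)
lemma fk_foldl_max_eq (r : List Int) (a : Int) (ha : 0 ≤ a) :
    r.foldl max a = max a ((PySem.List.max? r (fun x => x)).getD 0) := by
  cases r with
  | nil => simp only [List.foldl_nil]; simp [PySem.List.max?]; omega
  | cons x r =>
    rw [PySem.List.max?_id_cons]
    simp only [Option.getD_some]
    have : max a x = max a x := rfl
    calc (x :: r).foldl max a = r.foldl max (max a x) := by simp [List.foldl_cons]
      _ = max a (r.foldl max x) := fk_foldl_max_pull r a x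

-- B's first pass equals the structural recursion fkBest
lemma fk_best_eq (string : String) (xs : List String) :
    (PySem.List.max?
      ((xs.filter (fun k => PySem.Str.isIn k string)).map (fun k => PySem.Str.len k))
      (fun x => x)).getD 0 = fkBest string xs := by
  induction xs with
  | nil => simp [PySem.List.max?, fkBest]
  | cons k t ih =>
    by_cases h : PySem.Str.isIn k string = true
    · simp only [List.filter_cons, h, if_pos, List.map_cons, fkBest]
      rw [PySem.List.max?_id_cons]
      simp only [Option.getD_some]
      rw [fk_foldl_max_eq _ _ (fk_len_nonneg k), ih]
    · simp only [List.filter_cons, h, fkBest]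
      simp only [Bool.false_eq_true, if_false]
      exact ih

-- main invariant: the loop's result has the maximal matched length, and is
-- the first keyword of that length that matches
lemma fk_main (string : String) (xs : List String) :
    PySem.Str.len (fkRun string "" xs) = fkBest string xs ∧
    (xs.find? (fun k => PySem.Str.len k == fkBest string xs && PySem.Str.isIn k string)).getD ""
      = fkRun string "" xs := by
  induction xs with
  | nil => exact ⟨fk_len_empty, rfl⟩
  | cons k t ih =>
    obtain ⟨ih1, ih2⟩ := ih
    have hrun : fkRun string "" (k :: t) = fkRun string (fkStep string "" k) t := rfl
    by_cases h : PySem.Str.isIn k string = true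
    · rw [fkStep_empty string k h] at hrun
      rw [fk_run_acc string t k] at hrun
      have hbest : fkBest string (k :: t) = max (PySem.Str.len k) (fkBest string t) := by
        unfold fkBest; rw [if_pos h]; cases t <;> rfl
      by_cases hlt : PySem.Str.len k < PySem.Str.len (fkRun string "" t)
      · -- the tail's best is strictly longer: k is neither the result nor of best length
        rw [if_pos hlt] at hrun
        have hmax : fkBest string (k :: t) = fkBest string t := by rw [hbest]; omega
        constructor
        · rw [hrun, ih1, hmax]
        · rw [hmax, List.find?_cons]
          have hne : PySem.Str.len k ≠ fkBest string t := by omega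
          rw [PySem.Str.len_eq] at hne
          have hpk : (PySem.Str.len k == fkBest string t && PySem.Str.isIn k string) = false := by
            simp only [Bool.and_eq_false_iff, beq_eq_false_iff_ne, ne_eq, PySem.Str.len_eq]
            exact Or.inl hne
          rw [hpk]
          rw [ih2, hrun]
      · -- k is at least as long as the tail's best: k wins (earliest of the longest)
        rw [if_neg hlt] at hrun
        have hmax : fkBest string (k :: t) = PySem.Str.len k := by rw [hbest]; omega
        constructor
        · rw [hrun, hmax]
        · rw [hmax, List.find?_cons]
          have hpk : (PySem.Str.len k == PySem.Str.len k && PySem.Str.isIn k string) = true := by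
            simp only [beq_self_eq_true, Bool.true_and]; exact h
          rw [hpk]
          simp [hrun]
    · rw [fkStep_false string "" k h] at hrun
      have hbest : fkBest string (k :: t) = fkBest string t := by
        unfold fkBest; rw [if_neg h]; cases t <;> rfl
      constructor
      · rw [hrun, ih1, hbest]
      · rw [hbest, List.find?_cons]
        have hpk : (PySem.Str.len k == fkBest string t && PySem.Str.isIn k string) = false := by
          simp only [Bool.and_eq_false_iff]
          exact Or.inr (Bool.eq_false_iff.mpr h)
        rw [hpk, ih2, hrun]

-- ===== VERDICT (by name: the statement is the Claim_ definition above) =====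
theorem find_longest_keyword_spec : Claim_equal_find_longest_keyword := by
  intro string list_key _
  show find_longest_keyword string list_key = find_longest_keyword_alt string list_key
  unfold find_longest_keyword find_longest_keyword_alt
  rw [fk_stepA_eq string]
  rw [fk_best_eq string list_key]
  exact (fk_sorted_run string list_key).trans (fk_main string list_key).2.symm
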